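-- pv_equiv track=rewrite | github.com/winkeung/hide_indent | group_indent.py | findNoIndentChar
-- ===== SOURCE A (Python) =====
-- def findNoIndentChar(ln):
--     l = len(ln)
--
--     for i in range(l):
--         c = ln[i]
--         if c == " " or c == "|" or c == "+" or c == "-" or c == "\\":
--             #print "space"
--             pass
--         else:
--             #print c
--             break
--     else: # end loop without break
--         return -1 #incdicate a blank line
--     return i
-- ===== SOURCE B (Python) =====
-- def findNoIndentChar(ln):
--     stripped = ln.lstrip(" |+-\\")
--     if stripped == "":
--         return -1
--     return len(ln) - len(stripped)
-- ===== Notes on version B (the rewrite author's own statement) =====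
-- stated objective: idiomatic
-- what changed: Replaced the explicit indexed loop with for-else over characters by a single lstrip of the indent-character set; -1 when everything was stripped, else len(ln) - len(stripped).
import Mathlib
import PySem

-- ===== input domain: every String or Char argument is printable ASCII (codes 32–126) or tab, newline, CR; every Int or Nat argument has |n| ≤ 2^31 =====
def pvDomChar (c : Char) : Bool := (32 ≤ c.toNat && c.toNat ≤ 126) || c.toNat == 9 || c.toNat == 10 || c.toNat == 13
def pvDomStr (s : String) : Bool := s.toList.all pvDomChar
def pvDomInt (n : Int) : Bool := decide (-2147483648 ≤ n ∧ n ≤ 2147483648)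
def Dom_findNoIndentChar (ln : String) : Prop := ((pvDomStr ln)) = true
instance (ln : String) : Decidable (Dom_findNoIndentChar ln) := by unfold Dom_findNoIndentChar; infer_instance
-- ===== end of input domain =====

-- B replaces A's indexed for-else loop over characters by lstrip of the indent set
-- (" |+-\") and a length subtraction; objective: more idiomatic, same behaviour.

-- ===== PORT A =====
-- A's loop: for i in range(len(ln)): if ln[i] in the indent set continue else break;
-- falling off the end returns -1, a break returns i.
def findNoIndentCharLoop : List Char → Int → Int
  | [], _ => -1
  | c :: rest, i =>
      if c == ' ' || c == '|' || c == '+' || c == '-' || c == '\\' then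
        findNoIndentCharLoop rest (i + 1)
      else
        i

def findNoIndentChar (ln : String) : Int := findNoIndentCharLoop ln.toList 0

-- ===== PORT B =====
-- stripped = ln.lstrip(" |+-\\"): lstrip with a char set = dropWhile membership (exact).
def findNoIndentChar_alt (ln : String) : Int :=
  let stripped := ln.toList.dropWhile (fun c => c ∈ [' ', '|', '+', '-', '\\'])
  if stripped = [] then -1
  else (ln.toList.length : Int) - (stripped.length : Int)

-- ===== PRECONDITION & SPEC =====
def Spec_findNoIndentChar (ln : String) (out : Int) : Prop := out = findNoIndentChar_alt ln
instance (ln : String) (out : Int) : Decidable (Spec_findNoIndentChar ln out) := by unfold Spec_findNoIndentChar; infer_instance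

-- ===== CLAIM (what is proved, stated in full; the proofs are below) =====
def Claim_equal_findNoIndentChar : Prop := ∀ (ln : String), Dom_findNoIndentChar ln → Spec_findNoIndentChar ln (findNoIndentChar ln)

-- ===== LEMMAS AND PROOFS =====

-- A's loop started at index i equals B's lstrip formula shifted by i.
theorem findNoIndentCharLoop_eq (cs : List Char) (i : Int) :
    findNoIndentCharLoop cs i =
      (if cs.dropWhile (fun c => c ∈ [' ', '|', '+', '-', '\\']) = [] then -1
       else i + ((cs.length : Int) -
         ((cs.dropWhile (fun c => c ∈ [' ', '|', '+', '-', '\\'])).length : Int))) := by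
  induction cs generalizing i with
  | nil => simp [findNoIndentCharLoop]
  | cons c rest ih =>
      by_cases h : (c == ' ' || c == '|' || c == '+' || c == '-' || c == '\\') = true
      · have hmem : (decide (c ∈ [' ', '|', '+', '-', '\\'])) = true := by
          simp only [List.mem_cons, List.not_mem_nil, or_false, decide_eq_true_eq]
          simp only [Bool.or_eq_true, beq_iff_eq] at h
          tauto
        simp only [findNoIndentCharLoop, h, if_true, List.dropWhile_cons, hmem, ih,
          List.length_cons]
        split_ifs with h2
        · rfl
        · push_cast; ring_nf
      · have hmem : (decide (c ∈ [' ', '|', '+', '-', '\\'])) = false := by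
          simp only [decide_eq_false_iff_not, List.mem_cons, List.not_mem_nil, or_false]
          simp only [Bool.or_eq_true, beq_iff_eq] at h
          tauto
        simp only [findNoIndentCharLoop, h, List.dropWhile_cons, hmem,
          List.length_cons]
        simp

-- ===== VERDICT (by name: the statement is the Claim_ definition above) =====
theorem findNoIndentChar_spec : Claim_equal_findNoIndentChar := by
  intro ln _
  unfold Spec_findNoIndentChar findNoIndentChar findNoIndentChar_alt
  simp only [findNoIndentCharLoop_eq, zero_add]
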